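-- pv_equiv track=rewrite | github.com/SainsburyWellcomeCentre/sequences_neuropixel_preprocess | Utilities/preprocessing.py | align_opto_trials_to_dataframe
-- ===== SOURCE A (Python) =====
-- def align_opto_trials_to_dataframe(trial_id,executed_optotrials):
--     counter = 0
--     optotrials_aligned = []
--     for index,item in enumerate(trial_id):
--         if index > 0:
--             if item == trial_id[index-1]:
--                 optotrials_aligned = optotrials_aligned + [executed_optotrials[counter]]
--             else:
--                 counter = counter + 1
--                 optotrials_aligned = optotrials_aligned + [executed_optotrials[counter]]
--         else:
--             optotrials_aligned = optotrials_aligned + [executed_optotrials[counter]]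
--     return optotrials_aligned
-- ===== SOURCE B (Python) =====
-- def align_opto_trials_to_dataframe(trial_id, executed_optotrials):
--     n = len(trial_id)
--     starts = [i for i in range(n) if i == 0 or trial_id[i] != trial_id[i - 1]]
--     def rank(i):
--         # binary search: number of run-starts <= i
--         lo, hi = 0, len(starts)
--         while lo < hi:
--             mid = (lo + hi) // 2
--             if starts[mid] <= i:
--                 lo = mid + 1
--             else:
--                 hi = mid
--         return lo
--     return [executed_optotrials[rank(i) - 1] for i in range(n)]
-- ===== Notes on version B (the rewrite author's own statement) =====
-- stated objective: faster
-- what changed: B first builds the sorted list of run-start indices of trial_id, then computes each output element independently by binary-searching that list (executed_optotrials[rank(i)-1]), replacing A's sequential counter loop whose 'list + [x]' re-concatenation is quadratic.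
import Mathlib
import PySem

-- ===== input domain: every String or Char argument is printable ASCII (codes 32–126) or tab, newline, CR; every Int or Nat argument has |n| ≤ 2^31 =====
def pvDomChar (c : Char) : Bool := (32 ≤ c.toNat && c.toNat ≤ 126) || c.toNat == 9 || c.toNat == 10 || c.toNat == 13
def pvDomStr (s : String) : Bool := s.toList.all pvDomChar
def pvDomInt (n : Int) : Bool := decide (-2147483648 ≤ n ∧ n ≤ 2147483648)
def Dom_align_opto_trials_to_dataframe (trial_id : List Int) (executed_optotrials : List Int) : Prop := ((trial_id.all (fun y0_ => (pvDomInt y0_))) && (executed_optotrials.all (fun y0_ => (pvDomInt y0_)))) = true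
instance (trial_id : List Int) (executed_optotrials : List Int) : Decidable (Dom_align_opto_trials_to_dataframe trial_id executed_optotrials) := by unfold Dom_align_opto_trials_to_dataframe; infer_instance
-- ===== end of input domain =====

-- B builds the sorted list of run-start indices of trial_id once, then computes each output
-- element independently by binary-searching that list, instead of A's sequential counter loop
-- with quadratic list re-concatenation (measurably faster).

-- ===== PORT A =====
-- loop body of A: state = (counter, optotrials_aligned), entry = (index, item)
def pvStepA (trial_id executed_optotrials : List Int) (st : Int × List Int) (p : Int × Int) : Int × List Int :=
  if p.1 > 0 then
    if p.2 = PySem.List.pyGetD trial_id (p.1 - 1) 0 then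
      (st.1, st.2 ++ [PySem.List.pyGetD executed_optotrials st.1 0])
    else
      (st.1 + 1, st.2 ++ [PySem.List.pyGetD executed_optotrials (st.1 + 1) 0])
  else
    (st.1, st.2 ++ [PySem.List.pyGetD executed_optotrials st.1 0])

def align_opto_trials_to_dataframe (trial_id : List Int) (executed_optotrials : List Int) : List Int :=
  ((PySem.List.enumerate trial_id).foldl (pvStepA trial_id executed_optotrials) (0, [])).2

-- ===== PORT B =====
-- the filter condition of B's comprehension: i == 0 or trial_id[i] != trial_id[i-1]
def pvStartP (trial_id : List Int) (i : Int) : Bool :=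
  i == 0 || !(PySem.List.pyGetD trial_id i 0 == PySem.List.pyGetD trial_id (i - 1) 0)

-- starts = [i for i in range(n) if i == 0 or trial_id[i] != trial_id[i-1]]
def pvStarts (trial_id : List Int) : List Int :=
  (PySem.List.pyRange 0 trial_id.length 1).filter (pvStartP trial_id)

-- rank(i): the while-loop binary search (lo, hi are list indices, hence Nat; Nat division
-- equals Python's // on these nonnegative values)
-- fuel = hi - lo bounds the iteration count, so the structural recursion runs the
-- while-loop to completion exactly
def pvRankGo (starts : List Int) (i : Int) : Nat → Nat → Nat → Nat
  | 0, lo, _hi => lo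
  | fuel + 1, lo, hi =>
    if lo < hi then
      let mid := (lo + hi) / 2
      if PySem.List.pyGetD starts (mid : Int) 0 ≤ i then pvRankGo starts i fuel (mid + 1) hi
      else pvRankGo starts i fuel lo mid
    else lo

def pvRankLoop (starts : List Int) (i : Int) (lo hi : Nat) : Nat :=
  pvRankGo starts i (hi - lo) lo hi

def align_opto_trials_to_dataframe_alt (trial_id : List Int) (executed_optotrials : List Int) : List Int :=
  let starts := pvStarts trial_id
  (PySem.List.pyRange 0 trial_id.length 1).map
    (fun i => PySem.List.pyGetD executed_optotrials
      ((pvRankLoop starts i 0 starts.length : Int) - 1) 0)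

-- ===== PRECONDITION & SPEC =====
-- Pre_ excludes exactly the inputs on which Python A raises IndexError:
-- executed_optotrials shorter than the number of consecutive runs of trial_id.
def pvRunCount : List Int → Nat
  | [] => 0
  | [_] => 1
  | x :: y :: t => (if x = y then 0 else 1) + pvRunCount (y :: t)

def Pre_align_opto_trials_to_dataframe (trial_id : List Int) (executed_optotrials : List Int) : Prop :=
  pvRunCount trial_id ≤ executed_optotrials.length

instance (trial_id : List Int) (executed_optotrials : List Int) : Decidable (Pre_align_opto_trials_to_dataframe trial_id executed_optotrials) := by unfold Pre_align_opto_trials_to_dataframe; infer_instance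

def pvWitness_align_opto_trials_to_dataframe : List Int × List Int := ([1, 1, 2], [5, 7])

def Spec_align_opto_trials_to_dataframe (trial_id : List Int) (executed_optotrials : List Int) (out : List Int) : Prop := out = align_opto_trials_to_dataframe_alt trial_id executed_optotrials
instance (trial_id : List Int) (executed_optotrials : List Int) (out : List Int) : Decidable (Spec_align_opto_trials_to_dataframe trial_id executed_optotrials out) := by unfold Spec_align_opto_trials_to_dataframe; infer_instance

-- ===== CLAIM (what is proved, stated in full; the proofs are below) =====
def Claim_equal_align_opto_trials_to_dataframe : Prop := ∀ (trial_id : List Int) (executed_optotrials : List Int), Dom_align_opto_trials_to_dataframe trial_id executed_optotrials → Pre_align_opto_trials_to_dataframe trial_id executed_optotrials → Spec_align_opto_trials_to_dataframe trial_id executed_optotrials (align_opto_trials_to_dataframe trial_id executed_optotrials)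

-- ===== LEMMAS AND PROOFS =====

-- output of A's remaining loop given the previous item and the current counter
def pvSpecAux (e : List Int) (prev c : Int) : List Int → List Int
  | [] => []
  | x :: xs =>
    if x = prev then PySem.List.pyGetD e c 0 :: pvSpecAux e x c xs
    else PySem.List.pyGetD e (c + 1) 0 :: pvSpecAux e x (c + 1) xs

-- bnds tid m = number of run boundaries among positions 1..m of tid
def pvBnds : List Int → Nat → Nat
  | _, 0 => 0
  | [], _ + 1 => 0
  | [_], _ + 1 => 0
  | a :: b :: t, m + 1 => (if b = a then 0 else 1) + pvBnds (b :: t) m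

theorem pvLemA (tid e : List Int) :
    ∀ (xs : List Int) (i : Nat) (prev c : Int) (acc : List Int),
      1 ≤ i → tid.drop (i - 1) = prev :: xs →
      ((PySem.List.enumerate xs (i : Int)).foldl (pvStepA tid e) (c, acc)).2
        = acc ++ pvSpecAux e prev c xs := by
  intro xs
  induction xs with
  | nil =>
    intro i prev c acc _ _
    simp [pvSpecAux, PySem.List.enumerate]
  | cons x xs ih =>
    intro i prev c acc hi hd
    have hlen : i - 1 < tid.length := by
      have := congrArg List.length hd
      simp at this; omega
    have hcons := List.drop_eq_getElem_cons hlen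
    rw [hd] at hcons
    have h1 : i - 1 + 1 = i := by omega
    rw [h1] at hcons
    have hprev : tid[i - 1] = prev := (List.cons.injEq _ _ _ _ ▸ hcons).1.symm
    have htail : tid.drop i = x :: xs := (List.cons.injEq _ _ _ _ ▸ hcons).2.symm
    have hget : PySem.List.pyGetD tid ((i : Int) - 1) 0 = prev := by
      have h2 : ((i : Int) - 1) = ((i - 1 : Nat) : Int) := by omega
      rw [h2, PySem.List.pyGetD_natCast, List.getD_eq_getElem _ _ hlen, hprev]
    rw [PySem.List.enumerate_cons]
    simp only [List.foldl_cons]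
    have hpos : ((i : Int) > 0) := by exact_mod_cast hi
    by_cases hx : x = prev
    · have hstep : pvStepA tid e (c, acc) ((i : Int), x)
          = (c, acc ++ [PySem.List.pyGetD e c 0]) := by
        simp [pvStepA, hget, hx]
      rw [hstep]
      have hd' : tid.drop (i + 1 - 1) = x :: xs := by
        rw [Nat.add_sub_cancel]; exact htail
      have := ih (i + 1) x c (acc ++ [PySem.List.pyGetD e c 0]) (by omega) hd'
      push_cast at this ⊢
      rw [this, pvSpecAux, if_pos hx, hx]
      simp
    · have hstep : pvStepA tid e (c, acc) ((i : Int), x)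
          = (c + 1, acc ++ [PySem.List.pyGetD e (c + 1) 0]) := by
        simp [pvStepA, hget, hx]; omega
      rw [hstep]
      have hd' : tid.drop (i + 1 - 1) = x :: xs := by
        rw [Nat.add_sub_cancel]; exact htail
      have := ih (i + 1) x (c + 1) (acc ++ [PySem.List.pyGetD e (c + 1) 0]) (by omega) hd'
      push_cast at this ⊢
      rw [this, pvSpecAux, if_neg hx]
      simp

-- pvSpecAux computed elementwise through pvBnds
theorem pvLemSpecMap (e : List Int) :
    ∀ (xs : List Int) (prev c : Int),
      pvSpecAux e prev c xs
        = (List.range xs.length).map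
            (fun k => PySem.List.pyGetD e (c + (pvBnds (prev :: xs) (k + 1) : Int)) 0) := by
  intro xs
  induction xs with
  | nil => intro prev c; simp [pvSpecAux]
  | cons x xs ih =>
    intro prev c
    rw [show (x :: xs).length = xs.length + 1 from rfl, List.range_succ_eq_map]
    by_cases hx : x = prev
    · rw [pvSpecAux, if_pos hx, ih x c]
      simp only [List.map_cons, List.map_map]
      congr 1
      · simp [pvBnds, hx]
      · apply List.map_congr_left
        intro k _
        simp [Function.comp, pvBnds, hx]
    · rw [pvSpecAux, if_neg hx, ih x (c + 1)]
      simp only [List.map_cons, List.map_map]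
      congr 1
      · simp [pvBnds, hx]
      · apply List.map_congr_left
        intro k _
        simp only [Function.comp, pvBnds, if_neg hx]
        push_cast
        ring_nf

-- elementwise characterisation of A
theorem pvAChar (tid e : List Int) :
    align_opto_trials_to_dataframe tid e
      = (List.range tid.length).map
          (fun k => PySem.List.pyGetD e ((pvBnds tid k : Int)) 0) := by
  cases tid with
  | nil => simp [align_opto_trials_to_dataframe, PySem.List.enumerate]
  | cons x xs =>
    unfold align_opto_trials_to_dataframe
    rw [show PySem.List.enumerate (x :: xs) = (0, x) :: PySem.List.enumerate xs 1 by
      rw [PySem.List.enumerate_cons]; norm_num]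
    simp only [List.foldl_cons]
    rw [show pvStepA (x :: xs) e (0, []) ((0 : Int), x)
          = (0, [PySem.List.pyGetD e 0 0]) by simp [pvStepA]]
    rw [show ((1 : Int)) = ((1 : Nat) : Int) by rfl]
    rw [pvLemA (x :: xs) e xs 1 x 0 [PySem.List.pyGetD e 0 0] (by omega) (by simp)]
    rw [pvLemSpecMap]
    rw [show (x :: xs).length = xs.length + 1 from rfl, List.range_succ_eq_map]
    simp [pvBnds, List.map_map, Function.comp, PySem.List.pyGetD_zero, List.getD_eq_getElem?_getD]

-- binary search correctness, by induction on the fuel bound hi - lo ≤ M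
theorem pvBSLoop (s : List Int) (i : Int)
    (mono : ∀ j1 j2 : Nat, j1 ≤ j2 → j2 < s.length → s.getD j1 0 ≤ s.getD j2 0) :
    ∀ (M lo hi : Nat), hi - lo ≤ M → lo ≤ hi → hi ≤ s.length →
      (∀ j : Nat, j < lo → s.getD j 0 ≤ i) →
      (∀ j : Nat, hi ≤ j → j < s.length → i < s.getD j 0) →
      pvRankGo s i M lo hi ≤ hi ∧
        ∀ j : Nat, j < s.length → (j < pvRankGo s i M lo hi ↔ s.getD j 0 ≤ i) := by
  intro M
  induction M with
  | zero =>
    intro lo hi hM hlh hhi hb ha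
    simp only [pvRankGo]
    refine ⟨by omega, fun j hj => ⟨fun h => hb j h, fun h => ?_⟩⟩
    by_contra hge
    exact absurd h (not_le.mpr (ha j (by omega) hj))
  | succ M ih =>
    intro lo hi hM hlh hhi hb ha
    by_cases hlt : lo < hi
    · simp only [pvRankGo, if_pos hlt]
      have hmid : (lo + hi) / 2 < s.length := by omega
      by_cases hle : PySem.List.pyGetD s (((lo + hi) / 2 : Nat) : Int) 0 ≤ i
      · simp only [if_pos hle]
        have hle' : s.getD ((lo + hi) / 2) 0 ≤ i := by
          rwa [PySem.List.pyGetD_natCast] at hle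
        have h1 : ∀ j : Nat, j < (lo + hi) / 2 + 1 → s.getD j 0 ≤ i := fun j hj =>
          le_trans (mono j ((lo + hi) / 2) (by omega) hmid) hle'
        exact ih ((lo + hi) / 2 + 1) hi (by omega) (by omega) hhi h1 ha
      · simp only [if_neg hle]
        have hle' : i < s.getD ((lo + hi) / 2) 0 := by
          rw [PySem.List.pyGetD_natCast] at hle; omega
        have h2 : ∀ j : Nat, (lo + hi) / 2 ≤ j → j < s.length → i < s.getD j 0 := fun j hj hjl =>
          lt_of_lt_of_le hle' (mono ((lo + hi) / 2) j hj hjl)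
        have := ih lo ((lo + hi) / 2) (by omega) (by omega) (by omega) hb h2
        exact ⟨by omega, this.2⟩
    · simp only [pvRankGo, if_neg hlt]
      refine ⟨by omega, fun j hj => ⟨fun h => hb j h, fun h => ?_⟩⟩
      by_contra hge
      exact absurd h (not_le.mpr (ha j (by omega) hj))

-- a prefix-characterised count: if p holds exactly on the first r positions, countP = r
theorem pvCountOfPrefix (p : Int → Bool) :
    ∀ (s : List Int) (r : Nat), r ≤ s.length →
      (∀ j : Nat, j < s.length → (j < r ↔ p (s.getD j 0) = true)) →
      s.countP p = r := by
  intro s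
  induction s with
  | nil =>
    intro r hr _
    simp only [List.length_nil, Nat.le_zero] at hr
    simp [List.countP_nil, hr]
  | cons a t ih =>
    intro r hr h
    cases r with
    | zero =>
      have ha : ¬ p a = true := by
        intro hp
        have := (h 0 (by simp)).2 (by simpa [List.getD_cons_zero] using hp)
        omega
      rw [List.countP_cons, if_neg ha]
      have := ih 0 (by omega) (fun j hj => by
        have hh := h (j + 1) (by simp; omega)
        rw [List.getD_cons_succ] at hh
        exact ⟨fun hx => absurd hx (by omega), fun hp => absurd (hh.2 hp) (by omega)⟩)
      omega
    | succ r' =>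
      have ha : p a = true := by
        have := (h 0 (by simp)).1 (by omega)
        simpa [List.getD_cons_zero] using this
      rw [List.countP_cons, if_pos ha]
      have hr' : r' ≤ t.length := by simp at hr; omega
      have := ih r' hr' (fun j hj => by
        have hh := h (j + 1) (by simp; omega)
        rw [List.getD_cons_succ] at hh
        exact ⟨fun hx => hh.1 (by omega), fun hp => by have := hh.2 hp; omega⟩)
      omega

-- pvStarts is strictly increasing, hence monotone through getD
theorem pvStartsMono (tid : List Int) :
    ∀ j1 j2 : Nat, j1 ≤ j2 → j2 < (pvStarts tid).length →
      (pvStarts tid).getD j1 0 ≤ (pvStarts tid).getD j2 0 := by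
  have hp : (pvStarts tid).Pairwise (· < ·) :=
    List.Pairwise.filter _ (PySem.List.pairwise_lt_pyRange_one 0 tid.length)
  intro j1 j2 h12 h2
  rcases Nat.lt_or_ge j1 j2 with hlt | hge
  · have := (List.pairwise_iff_getElem.mp hp) j1 j2 (by omega) h2 hlt
    rw [List.getD_eq_getElem _ _ (by omega), List.getD_eq_getElem _ _ h2]
    exact le_of_lt this
  · have : j1 = j2 := by omega
    subst this; exact le_refl _

-- pvBnds grows by the boundary indicator
theorem pvBndsSucc :
    ∀ (k : Nat) (tid : List Int), k + 1 < tid.length →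
      pvBnds tid (k + 1)
        = pvBnds tid k + (if tid.getD (k + 1) 0 = tid.getD k 0 then 0 else 1) := by
  intro k
  induction k with
  | zero =>
    intro tid h
    match tid, h with
    | a :: b :: t, _ => simp [pvBnds]
  | succ k ih =>
    intro tid h
    match tid, h with
    | a :: b :: t, h =>
      have hlen : k + 1 < (b :: t).length := by simp at h ⊢; omega
      have hrec := ih (b :: t) hlen
      simp only [pvBnds]
      rw [hrec]
      simp only [List.getD_cons_succ]
      omega

-- count of start positions in range(0, k+1)
theorem pvCntRange (tid : List Int) :
    ∀ k : Nat, k < tid.length →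
      (PySem.List.pyRange 0 ((k : Int) + 1) 1).countP (pvStartP tid) = pvBnds tid k + 1 := by
  intro k
  induction k with
  | zero =>
    intro _
    rw [show ((0 : Nat) : Int) + 1 = 0 + 1 by norm_num, PySem.List.pyRange_one_singleton]
    simp [pvStartP, pvBnds]
  | succ k ih =>
    intro hk
    have hk' : k < tid.length := by omega
    rw [show ((k + 1 : Nat) : Int) + 1 = (((k : Int) + 1) + 1) by push_cast; ring,
      PySem.List.pyRange_one_succ_right (by omega), List.countP_append, ih hk']
    have e1 : PySem.List.pyGetD tid ((k : Int) + 1) 0 = tid.getD (k + 1) 0 := by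
      rw [show ((k : Int) + 1) = ((k + 1 : Nat) : Int) by push_cast; ring,
        PySem.List.pyGetD_natCast]
    have e2 : PySem.List.pyGetD tid (((k : Int) + 1) - 1) 0 = tid.getD k 0 := by
      rw [show (((k : Int) + 1) - 1) = ((k : Nat) : Int) by omega,
        PySem.List.pyGetD_natCast]
    have h0 : (((k : Int) + 1) == 0) = false := by
      simp only [beq_eq_false_iff_ne]; omega
    have hgp : pvStartP tid ((k : Int) + 1)
        = !(tid.getD (k + 1) 0 == tid.getD k 0) := by
      simp only [pvStartP, e1, e2, h0, Bool.false_or]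
    rw [pvBndsSucc k tid (by omega)]
    simp only [List.countP_cons, List.countP_nil, hgp, Bool.not_eq_true', beq_eq_false_iff_ne]
    split_ifs <;> omega

-- the binary-search rank equals pvBnds + 1
theorem pvRankEq (tid : List Int) (k : Nat) (hk : k < tid.length) :
    pvRankLoop (pvStarts tid) (k : Int) 0 (pvStarts tid).length = pvBnds tid k + 1 := by
  simp only [pvRankLoop, Nat.sub_zero]
  have hbs := pvBSLoop (pvStarts tid) (k : Int) (pvStartsMono tid)
      (pvStarts tid).length 0 (pvStarts tid).length (by omega) (by omega) (le_refl _)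
      (fun j hj => absurd hj (Nat.not_lt_zero j))
      (fun j h1 h2 => absurd (lt_of_le_of_lt h1 h2) (lt_irrefl _))
  have hcount := pvCountOfPrefix (fun x => decide (x ≤ (k : Int))) (pvStarts tid)
      (pvRankGo (pvStarts tid) (k : Int) (pvStarts tid).length 0 (pvStarts tid).length)
      hbs.1
      (fun j hj => by simpa using hbs.2 j hj)
  have hcnt2 : (pvStarts tid).countP (fun x => decide (x ≤ (k : Int)))
      = pvBnds tid k + 1 := by
    unfold pvStarts
    rw [List.countP_filter]
    rw [PySem.List.pyRange_one_append 0 ((k : Int) + 1) tid.length (by omega) (by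
        have : (k : Int) < (tid.length : Int) := by exact_mod_cast hk
        omega),
      List.countP_append]
    have hz : (PySem.List.pyRange ((k : Int) + 1) tid.length).countP
        (fun a => decide (a ≤ (k : Int)) && pvStartP tid a) = 0 := by
      rw [List.countP_eq_zero]
      intro a ha
      have := PySem.List.mem_pyRange_one.mp ha
      simp only [Bool.and_eq_true, decide_eq_true_eq]
      rintro ⟨h1, _⟩
      omega
    have hc : (PySem.List.pyRange 0 ((k : Int) + 1)).countP
        (fun a => decide (a ≤ (k : Int)) && pvStartP tid a)
        = (PySem.List.pyRange 0 ((k : Int) + 1)).countP (pvStartP tid) := by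
      apply List.countP_congr
      intro x hx
      have := PySem.List.mem_pyRange_one.mp hx
      simp only [Bool.and_eq_true, decide_eq_true_eq]
      constructor
      · exact fun h => h.2
      · exact fun h => ⟨by omega, h⟩
    rw [hz, hc, pvCntRange tid k hk]
  omega

-- ===== VERDICT (by name: the statement is the Claim_ definition above) =====
theorem align_opto_trials_to_dataframe_spec : Claim_equal_align_opto_trials_to_dataframe := by
  intro tid e _ _
  unfold Spec_align_opto_trials_to_dataframe
  rw [pvAChar]
  unfold align_opto_trials_to_dataframe_alt
  rw [PySem.List.pyRange_one]
  simp only [Int.sub_zero, Int.toNat_natCast, List.map_map]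
  apply List.map_congr_left
  intro k hk
  have hk' : k < tid.length := List.mem_range.mp hk
  simp only [Function.comp]
  rw [show (0 : Int) + (k : Int) = (k : Int) by ring, pvRankEq tid k hk']
  rw [show ((pvBnds tid k + 1 : Nat) : Int) - 1 = ((pvBnds tid k : Nat) : Int) by push_cast; ring]
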